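-- pv_equiv track=rewrite | github.com/ashwinikanamareddy/traffic_detect | views/violations.py | _bucket_label
-- ===== SOURCE A (Python) =====
-- def _bucket_label(hour):
--     buckets = [
--         (6, 9, "06:00 - 09:00"),
--         (9, 12, "09:00 - 12:00"),
--         (12, 15, "12:00 - 15:00"),
--         (15, 18, "15:00 - 18:00"),
--         (18, 21, "18:00 - 21:00"),
--     ]
--     for start, end, label in buckets:
--         if start <= hour < end:
--             return label
--     return None
-- ===== SOURCE B (Python) =====
-- def _bucket_label(hour):
--     if not (6 <= hour < 21):
--         return None
--     index = int((hour - 6) // 3)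
--     start = 6 + 3 * index
--     return "%02d:00 - %02d:00" % (start, start + 3)
-- ===== Notes on version B (the rewrite author's own statement) =====
-- stated objective: simpler
-- what changed: Replaces the 5-entry table scan with a range guard and closed-form arithmetic: index = (hour-6)//3, start = 6+3*index, label formatted with %02d.
import Mathlib
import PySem

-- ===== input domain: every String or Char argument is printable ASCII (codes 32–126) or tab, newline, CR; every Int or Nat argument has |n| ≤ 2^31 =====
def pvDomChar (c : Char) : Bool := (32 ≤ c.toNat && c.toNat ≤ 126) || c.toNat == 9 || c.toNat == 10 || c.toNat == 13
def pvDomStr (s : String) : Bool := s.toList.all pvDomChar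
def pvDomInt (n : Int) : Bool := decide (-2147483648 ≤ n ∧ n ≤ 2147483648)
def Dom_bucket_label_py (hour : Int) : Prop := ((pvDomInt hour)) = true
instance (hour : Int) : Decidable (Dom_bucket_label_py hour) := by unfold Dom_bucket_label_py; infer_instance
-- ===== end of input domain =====

-- B replaces A's 5-entry table scan with a range guard and closed-form arithmetic on the evenly spaced buckets (objective: simpler).

-- ===== PORT A =====
-- A scans the bucket table in order, returning the first label whose [start, end) contains hour.
def pvBucketScan (hour : Int) : List (Int × Int × String) → Option String
  | [] => none
  | (s, e, l) :: rest => if s ≤ hour ∧ hour < e then some l else pvBucketScan hour rest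

def bucket_label_py (hour : Int) : Option String :=
  pvBucketScan hour
    [(6, 9, "06:00 - 09:00"),
     (9, 12, "09:00 - 12:00"),
     (12, 15, "12:00 - 15:00"),
     (15, 18, "15:00 - 18:00"),
     (18, 21, "18:00 - 21:00")]

-- ===== PORT B =====
-- "%02d" for 0 ≤ n < 100 (only applied to 6..21 here)
def pvFmt2 (n : Int) : String := (if n < 10 then "0" ++ PySem.Int.toStr n else PySem.Int.toStr n)

def bucket_label_py_alt (hour : Int) : Option String :=
  if ¬ (6 ≤ hour ∧ hour < 21) then none
  else
    let index := PySem.Int.floordiv (hour - 6) 3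
    let start := 6 + 3 * index
    some (pvFmt2 start ++ ":00 - " ++ pvFmt2 (start + 3) ++ ":00")

-- ===== PRECONDITION & SPEC =====
def Spec_bucket_label_py (hour : Int) (out : Option String) : Prop := out = bucket_label_py_alt hour
instance (hour : Int) (out : Option String) : Decidable (Spec_bucket_label_py hour out) := by unfold Spec_bucket_label_py; infer_instance

-- ===== CLAIM (what is proved, stated in full; the proofs are below) =====
def Claim_equal_bucket_label_py : Prop := ∀ (hour : Int), Dom_bucket_label_py hour → Spec_bucket_label_py hour (bucket_label_py hour)

-- ===== LEMMAS AND PROOFS =====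

-- ===== VERDICT (by name: the statement is the Claim_ definition above) =====
theorem bucket_label_py_spec : Claim_equal_bucket_label_py := by
  intro hour _
  unfold Spec_bucket_label_py
  by_cases hin : 6 ≤ hour ∧ hour < 21
  · obtain ⟨h1, h2⟩ := hin
    interval_cases hour <;> decide
  · simp only [bucket_label_py, bucket_label_py_alt, pvBucketScan]
    rw [if_pos hin]
    split_ifs with h1 h2 h3 h4 h5 <;> first | rfl | omega
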